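-- pv_equiv track=rewrite | github.com/ShivamBhosale/Stonks.ca | stonks/signals.py | _combo_text
-- ===== SOURCE A (Python) =====
-- def _combo_text(alerts: list[str], is_etf: bool) -> str | None:
--     """Return descriptive text for well-known signal combinations, or None."""
--     has = lambda kw: any(kw in a for a in alerts)
--
--     low_pe     = has("P/E") and not is_etf
--     vol_spike  = has("VOL")
--     near_high  = has("52W-HIGH")
--     near_low   = has("52W-LOW")
--     move_up    = has("MOVE UP")
--     move_down  = has("MOVE DOWN")
--     oversold   = has("OVERSOLD")
--     overbought = has("OVERBOUGHT")
--     golden     = has("GOLDEN CROSS")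
--     death      = has("DEATH CROSS")
--
--     # Multi-signal combos first
--     if oversold and near_low and low_pe:
--         return "Deep value + oversold — strong reversal watch"
--     if oversold and near_low:
--         return "Deep oversold near 52W low — reversal watch"
--     if overbought and near_high:
--         return "Overbought at 52W high — pullback risk"
--     if low_pe and near_low:
--         return "Value opportunity — research further"
--     if vol_spike and move_up and near_high:
--         return "Momentum breakout — watch continuation"
--     if vol_spike and move_up and golden:
--         return "Strong buying with bullish MA alignment"
--     if vol_spike and move_up:
--         return "Unusual buying interest"
--     if vol_spike and move_down and near_low:
--         return "Heavy selling near 52W low — high risk"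
--     if vol_spike and move_down and death:
--         return "Heavy selling with bearish MA alignment"
--     if vol_spike and move_down:
--         return "Unusual selling — investigate catalyst"
--
--     # Single-signal hints
--     if golden:     return "Bullish MA alignment"
--     if death:      return "Bearish MA alignment"
--     if near_low:   return "Oversold territory — reversal watch"
--     if near_high:  return "Near 52W high — breakout watch"
--     if oversold:   return "RSI oversold — potential bounce"
--     if overbought: return "RSI overbought — monitor pullback"
--     if low_pe:     return "Potentially undervalued"
--     if move_up:    return "Strong positive move today"
--     if move_down:  return "Notable decline today"
--     return None
-- ===== SOURCE B (Python) =====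
-- _KEYWORD_BITS = [
--     ("P/E", 1), ("VOL", 2), ("52W-HIGH", 4), ("52W-LOW", 8),
--     ("MOVE UP", 16), ("MOVE DOWN", 32), ("OVERSOLD", 64),
--     ("OVERBOUGHT", 128), ("GOLDEN CROSS", 256), ("DEATH CROSS", 512),
-- ]
--
-- # Ordered rules: bitmask of required signals -> text (multi-signal combos first).
-- _RULES = [
--     (73,  "Deep value + oversold — strong reversal watch"),   # OVERSOLD|52W-LOW|P/E
--     (72,  "Deep oversold near 52W low — reversal watch"),     # OVERSOLD|52W-LOW
--     (132, "Overbought at 52W high — pullback risk"),          # OVERBOUGHT|52W-HIGH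
--     (9,   "Value opportunity — research further"),            # P/E|52W-LOW
--     (22,  "Momentum breakout — watch continuation"),          # VOL|MOVE UP|52W-HIGH
--     (274, "Strong buying with bullish MA alignment"),         # VOL|MOVE UP|GOLDEN
--     (18,  "Unusual buying interest"),                         # VOL|MOVE UP
--     (42,  "Heavy selling near 52W low — high risk"),          # VOL|MOVE DOWN|52W-LOW
--     (546, "Heavy selling with bearish MA alignment"),         # VOL|MOVE DOWN|DEATH
--     (34,  "Unusual selling — investigate catalyst"),          # VOL|MOVE DOWN
--     (256, "Bullish MA alignment"),
--     (512, "Bearish MA alignment"),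
--     (8,   "Oversold territory — reversal watch"),
--     (4,   "Near 52W high — breakout watch"),
--     (64,  "RSI oversold — potential bounce"),
--     (128, "RSI overbought — monitor pullback"),
--     (1,   "Potentially undervalued"),
--     (16,  "Strong positive move today"),
--     (32,  "Notable decline today"),
-- ]
--
--
-- def _combo_text(alerts: list[str], is_etf: bool) -> str | None:
--     """Return descriptive text for well-known signal combinations, or None."""
--     # One pass over the alerts, accumulating a bitmask of the signals seen.
--     mask = 0
--     for a in alerts:
--         for kw, bit in _KEYWORD_BITS:
--             if kw in a:
--                 mask |= bit
--     if is_etf: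
--         mask -= mask & 1  # an ETF never qualifies as low P/E
--     # First rule whose required signals are all present.
--     for need, text in _RULES:
--         if mask & need == need:
--             return text
--     return None
-- ===== Notes on version B (the rewrite author's own statement) =====
-- stated objective: alternative
-- what changed: Replaces the ten separate any()-scans over the alerts plus a nineteen-branch boolean if-ladder by a single pass over the alerts that accumulates a signal BITMASK (one bit per keyword, the P/E bit cleared for ETFs), resolved by scanning an ordered table of required-signal masks with a bitwise subset test (mask & need == need).
import Mathlib
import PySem

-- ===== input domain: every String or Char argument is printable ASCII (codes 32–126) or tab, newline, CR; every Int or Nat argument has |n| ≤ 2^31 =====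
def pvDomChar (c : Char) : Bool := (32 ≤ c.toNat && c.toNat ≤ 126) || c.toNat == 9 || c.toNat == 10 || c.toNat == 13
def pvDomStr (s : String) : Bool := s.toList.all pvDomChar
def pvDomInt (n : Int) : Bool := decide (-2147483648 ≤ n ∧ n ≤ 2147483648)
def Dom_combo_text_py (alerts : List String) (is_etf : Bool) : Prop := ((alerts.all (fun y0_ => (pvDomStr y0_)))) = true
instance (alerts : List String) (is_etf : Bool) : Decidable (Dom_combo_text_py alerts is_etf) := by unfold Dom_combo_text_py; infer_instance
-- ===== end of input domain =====

-- B replaces A's ten staged any()-scans + if-ladder by a single pass over the alerts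
-- accumulating a signal BITMASK, resolved by bitwise subset tests against an ordered
-- mask table; objective: alternative algorithm/data structure, same asymptotic cost.

-- ===== PORT A =====
def combo_text_py (alerts : List String) (is_etf : Bool) : Option String :=
  let has := fun (kw : String) => alerts.any (fun a => PySem.Str.isIn kw a)
  let low_pe     := has "P/E" && !is_etf
  let vol_spike  := has "VOL"
  let near_high  := has "52W-HIGH"
  let near_low   := has "52W-LOW"
  let move_up    := has "MOVE UP"
  let move_down  := has "MOVE DOWN"
  let oversold   := has "OVERSOLD"
  let overbought := has "OVERBOUGHT"
  let golden     := has "GOLDEN CROSS"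
  let death      := has "DEATH CROSS"
  -- Multi-signal combos first
  if oversold && near_low && low_pe then some "Deep value + oversold — strong reversal watch"
  else if oversold && near_low then some "Deep oversold near 52W low — reversal watch"
  else if overbought && near_high then some "Overbought at 52W high — pullback risk"
  else if low_pe && near_low then some "Value opportunity — research further"
  else if vol_spike && move_up && near_high then some "Momentum breakout — watch continuation"
  else if vol_spike && move_up && golden then some "Strong buying with bullish MA alignment"
  else if vol_spike && move_up then some "Unusual buying interest"
  else if vol_spike && move_down && near_low then some "Heavy selling near 52W low — high risk"
  else if vol_spike && move_down && death then some "Heavy selling with bearish MA alignment"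
  else if vol_spike && move_down then some "Unusual selling — investigate catalyst"
  -- Single-signal hints
  else if golden then some "Bullish MA alignment"
  else if death then some "Bearish MA alignment"
  else if near_low then some "Oversold territory — reversal watch"
  else if near_high then some "Near 52W high — breakout watch"
  else if oversold then some "RSI oversold — potential bounce"
  else if overbought then some "RSI overbought — monitor pullback"
  else if low_pe then some "Potentially undervalued"
  else if move_up then some "Strong positive move today"
  else if move_down then some "Notable decline today"
  else none

-- ===== PORT B =====
-- Source B's _KEYWORD_BITS: each keyword with its bit in the signal bitmask
def comboKeywordBits : List (String × Nat) :=
  [ ("P/E", 1), ("VOL", 2), ("52W-HIGH", 4), ("52W-LOW", 8),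
    ("MOVE UP", 16), ("MOVE DOWN", 32), ("OVERSOLD", 64),
    ("OVERBOUGHT", 128), ("GOLDEN CROSS", 256), ("DEATH CROSS", 512) ]

-- Source B's _RULES: ordered (required-signal mask, text) pairs, multi-signal combos first
def comboRules : List (Nat × String) :=
  [ (73,  "Deep value + oversold — strong reversal watch"),
    (72,  "Deep oversold near 52W low — reversal watch"),
    (132, "Overbought at 52W high — pullback risk"),
    (9,   "Value opportunity — research further"),
    (22,  "Momentum breakout — watch continuation"),
    (274, "Strong buying with bullish MA alignment"),
    (18,  "Unusual buying interest"),
    (42,  "Heavy selling near 52W low — high risk"),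
    (546, "Heavy selling with bearish MA alignment"),
    (34,  "Unusual selling — investigate catalyst"),
    (256, "Bullish MA alignment"),
    (512, "Bearish MA alignment"),
    (8,   "Oversold territory — reversal watch"),
    (4,   "Near 52W high — breakout watch"),
    (64,  "RSI oversold — potential bounce"),
    (128, "RSI overbought — monitor pullback"),
    (1,   "Potentially undervalued"),
    (16,  "Strong positive move today"),
    (32,  "Notable decline today") ]

-- Source B's 'for need, text in _RULES: if mask & need == need: return text' loop
def comboMatch (mask : Nat) : List (Nat × String) → Option String
  | [] => none
  | (need, text) :: rest =>
      if mask &&& need == need then some text else comboMatch mask rest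

def combo_text_py_alt (alerts : List String) (is_etf : Bool) : Option String :=
  -- one pass over the alerts, accumulating a bitmask of the signals seen
  let mask := alerts.foldl
    (fun m a => comboKeywordBits.foldl
      (fun m' p => if PySem.Str.isIn p.1 a then m' ||| p.2 else m') m) 0
  -- an ETF never qualifies as low P/E
  let mask := if is_etf then mask - (mask &&& 1) else mask
  -- first rule whose required signals are all present
  comboMatch mask comboRules

-- ===== PRECONDITION & SPEC =====
def Spec_combo_text_py (alerts : List String) (is_etf : Bool) (out : Option String) : Prop := out = combo_text_py_alt alerts is_etf
instance (alerts : List String) (is_etf : Bool) (out : Option String) : Decidable (Spec_combo_text_py alerts is_etf out) := by unfold Spec_combo_text_py; infer_instance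

-- ===== CLAIM (what is proved, stated in full; the proofs are below) =====
def Claim_equal_combo_text_py : Prop := ∀ (alerts : List String) (is_etf : Bool), Dom_combo_text_py alerts is_etf → Spec_combo_text_py alerts is_etf (combo_text_py alerts is_etf)

-- ===== LEMMAS AND PROOFS =====

-- the canonical bitmask of ten flag booleans (bit i ↔ flag i)
def pvOfBools (b0 b1 b2 b3 b4 b5 b6 b7 b8 b9 : Bool) : Nat :=
  (cond b0 1 0) + (cond b1 2 0) + (cond b2 4 0) + (cond b3 8 0) + (cond b4 16 0) +
  (cond b5 32 0) + (cond b6 64 0) + (cond b7 128 0) + (cond b8 256 0) + (cond b9 512 0)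

-- bit i of a keyword fold records whether some entry carrying bit i fires (generic predicate)
theorem foldl_or_testBit {α : Type} (c : α → Bool) (l : List (α × Nat)) (m i : Nat) :
    (l.foldl (fun m' p => if c p.1 then m' ||| p.2 else m') m).testBit i
      = (m.testBit i || l.any (fun p => c p.1 && p.2.testBit i)) := by
  induction l generalizing m with
  | nil => simp
  | cons p rest ih =>
      simp only [List.foldl_cons, List.any_cons]
      by_cases h : c p.1
      · simp only [h, if_pos, ih, Nat.testBit_or, Bool.true_and, Bool.or_assoc]
      · simp [h, ih]

-- bit i of the whole mask records whether some alert contains a keyword carrying bit i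
theorem mask_testBit (alerts : List String) (m i : Nat) :
    (alerts.foldl (fun m a => comboKeywordBits.foldl
        (fun m' p => if PySem.Str.isIn p.1 a then m' ||| p.2 else m') m) m).testBit i
      = (m.testBit i ||
         alerts.any (fun a => comboKeywordBits.any (fun p => PySem.Str.isIn p.1 a && p.2.testBit i))) := by
  induction alerts generalizing m with
  | nil => simp
  | cons a rest ih =>
      simp only [List.foldl_cons, List.any_cons]
      rw [ih, foldl_or_testBit (fun kw => PySem.Str.isIn kw a), Bool.or_assoc]

-- each bit of pvOfBools is its flag, and the mask is below 2^10
theorem pvOfBools_bits (b0 b1 b2 b3 b4 b5 b6 b7 b8 b9 : Bool) :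
    (pvOfBools b0 b1 b2 b3 b4 b5 b6 b7 b8 b9).testBit 0 = b0 ∧
    (pvOfBools b0 b1 b2 b3 b4 b5 b6 b7 b8 b9).testBit 1 = b1 ∧
    (pvOfBools b0 b1 b2 b3 b4 b5 b6 b7 b8 b9).testBit 2 = b2 ∧
    (pvOfBools b0 b1 b2 b3 b4 b5 b6 b7 b8 b9).testBit 3 = b3 ∧
    (pvOfBools b0 b1 b2 b3 b4 b5 b6 b7 b8 b9).testBit 4 = b4 ∧
    (pvOfBools b0 b1 b2 b3 b4 b5 b6 b7 b8 b9).testBit 5 = b5 ∧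
    (pvOfBools b0 b1 b2 b3 b4 b5 b6 b7 b8 b9).testBit 6 = b6 ∧
    (pvOfBools b0 b1 b2 b3 b4 b5 b6 b7 b8 b9).testBit 7 = b7 ∧
    (pvOfBools b0 b1 b2 b3 b4 b5 b6 b7 b8 b9).testBit 8 = b8 ∧
    (pvOfBools b0 b1 b2 b3 b4 b5 b6 b7 b8 b9).testBit 9 = b9 ∧
    pvOfBools b0 b1 b2 b3 b4 b5 b6 b7 b8 b9 < 1024 := by
  revert b0 b1 b2 b3 b4 b5 b6 b7 b8 b9; decide

-- a keyword fold stays below 2^10 when every bit and the start value are below 2^10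
theorem foldl_or_lt {α : Type} (c : α → Bool) (l : List (α × Nat)) (m : Nat) :
    (∀ p ∈ l, p.2 < 1024) → m < 1024 →
    l.foldl (fun m' p => if c p.1 then m' ||| p.2 else m') m < 1024 := by
  induction l generalizing m with
  | nil => intro _ hm; simpa using hm
  | cons p rest ih =>
      intro hl hm
      simp only [List.foldl_cons]
      refine ih _ (fun q hq => hl q (List.mem_cons_of_mem _ hq)) ?_
      by_cases h : c p.1
      · simp only [h, if_pos]
        exact Nat.or_lt_two_pow (n := 10) hm (hl p List.mem_cons_self)
      · simpa [h] using hm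

theorem mask_lt (alerts : List String) (m : Nat) (hm : m < 1024) :
    alerts.foldl (fun m a => comboKeywordBits.foldl
        (fun m' p => if PySem.Str.isIn p.1 a then m' ||| p.2 else m') m) m < 1024 := by
  induction alerts generalizing m with
  | nil => simpa using hm
  | cons a rest ih =>
      simp only [List.foldl_cons]
      exact ih _ (foldl_or_lt (fun kw => PySem.Str.isIn kw a) comboKeywordBits m (by decide) hm)

-- the one-pass mask equals the canonical bitmask of A's ten has-flags
theorem mask_eq (alerts : List String) :
    alerts.foldl (fun m a => comboKeywordBits.foldl
        (fun m' p => if PySem.Str.isIn p.1 a then m' ||| p.2 else m') m) 0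
      = pvOfBools
          (alerts.any (fun a => PySem.Str.isIn "P/E" a))
          (alerts.any (fun a => PySem.Str.isIn "VOL" a))
          (alerts.any (fun a => PySem.Str.isIn "52W-HIGH" a))
          (alerts.any (fun a => PySem.Str.isIn "52W-LOW" a))
          (alerts.any (fun a => PySem.Str.isIn "MOVE UP" a))
          (alerts.any (fun a => PySem.Str.isIn "MOVE DOWN" a))
          (alerts.any (fun a => PySem.Str.isIn "OVERSOLD" a))
          (alerts.any (fun a => PySem.Str.isIn "OVERBOUGHT" a))
          (alerts.any (fun a => PySem.Str.isIn "GOLDEN CROSS" a))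
          (alerts.any (fun a => PySem.Str.isIn "DEATH CROSS" a)) := by
  obtain ⟨e0, e1, e2, e3, e4, e5, e6, e7, e8, e9, hlt⟩ :=
    pvOfBools_bits
      (alerts.any (fun a => PySem.Str.isIn "P/E" a))
      (alerts.any (fun a => PySem.Str.isIn "VOL" a))
      (alerts.any (fun a => PySem.Str.isIn "52W-HIGH" a))
      (alerts.any (fun a => PySem.Str.isIn "52W-LOW" a))
      (alerts.any (fun a => PySem.Str.isIn "MOVE UP" a))
      (alerts.any (fun a => PySem.Str.isIn "MOVE DOWN" a))
      (alerts.any (fun a => PySem.Str.isIn "OVERSOLD" a))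
      (alerts.any (fun a => PySem.Str.isIn "OVERBOUGHT" a))
      (alerts.any (fun a => PySem.Str.isIn "GOLDEN CROSS" a))
      (alerts.any (fun a => PySem.Str.isIn "DEATH CROSS" a))
  apply Nat.eq_of_testBit_eq
  intro i
  by_cases hi : i < 10
  · interval_cases i
    · rw [mask_testBit, e0]; simp [comboKeywordBits, Nat.testBit]
    · rw [mask_testBit, e1]; simp [comboKeywordBits, Nat.testBit]
    · rw [mask_testBit, e2]; simp [comboKeywordBits, Nat.testBit]
    · rw [mask_testBit, e3]; simp [comboKeywordBits, Nat.testBit]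
    · rw [mask_testBit, e4]; simp [comboKeywordBits, Nat.testBit]
    · rw [mask_testBit, e5]; simp [comboKeywordBits, Nat.testBit]
    · rw [mask_testBit, e6]; simp [comboKeywordBits, Nat.testBit]
    · rw [mask_testBit, e7]; simp [comboKeywordBits, Nat.testBit]
    · rw [mask_testBit, e8]; simp [comboKeywordBits, Nat.testBit]
    · rw [mask_testBit, e9]; simp [comboKeywordBits, Nat.testBit]
  · have h1 : (1024 : Nat) ≤ 2 ^ i := by
      calc (1024 : Nat) = 2 ^ 10 := rfl
      _ ≤ 2 ^ i := Nat.pow_le_pow_right (by norm_num) (by omega)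
    rw [Nat.testBit_lt_two_pow (lt_of_lt_of_le (mask_lt alerts 0 (by decide)) h1),
        Nat.testBit_lt_two_pow (lt_of_lt_of_le hlt h1)]

-- for any flag values, B's masked rule scan returns exactly what A's if-ladder returns
theorem match_eq_ladder (b0 b1 b2 b3 b4 b5 b6 b7 b8 b9 etf : Bool) :
    comboMatch
      (if etf then pvOfBools b0 b1 b2 b3 b4 b5 b6 b7 b8 b9 -
          (pvOfBools b0 b1 b2 b3 b4 b5 b6 b7 b8 b9 &&& 1)
        else pvOfBools b0 b1 b2 b3 b4 b5 b6 b7 b8 b9) comboRules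
      = (if b6 && b3 && (b0 && !etf) then some "Deep value + oversold — strong reversal watch"
        else if b6 && b3 then some "Deep oversold near 52W low — reversal watch"
        else if b7 && b2 then some "Overbought at 52W high — pullback risk"
        else if (b0 && !etf) && b3 then some "Value opportunity — research further"
        else if b1 && b4 && b2 then some "Momentum breakout — watch continuation"
        else if b1 && b4 && b8 then some "Strong buying with bullish MA alignment"
        else if b1 && b4 then some "Unusual buying interest"
        else if b1 && b5 && b3 then some "Heavy selling near 52W low — high risk"
        else if b1 && b5 && b9 then some "Heavy selling with bearish MA alignment"
        else if b1 && b5 then some "Unusual selling — investigate catalyst"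
        else if b8 then some "Bullish MA alignment"
        else if b9 then some "Bearish MA alignment"
        else if b3 then some "Oversold territory — reversal watch"
        else if b2 then some "Near 52W high — breakout watch"
        else if b6 then some "RSI oversold — potential bounce"
        else if b7 then some "RSI overbought — monitor pullback"
        else if b0 && !etf then some "Potentially undervalued"
        else if b4 then some "Strong positive move today"
        else if b5 then some "Notable decline today"
        else none) := by
  revert b0 b1 b2 b3 b4 b5 b6 b7 b8 b9 etf; decide

-- ===== VERDICT (by name: the statement is the Claim_ definition above) =====
theorem combo_text_py_spec : Claim_equal_combo_text_py := by
  intro alerts is_etf _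
  show combo_text_py alerts is_etf = combo_text_py_alt alerts is_etf
  unfold combo_text_py combo_text_py_alt
  rw [mask_eq alerts]
  exact (match_eq_ladder _ _ _ _ _ _ _ _ _ _ is_etf).symm
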